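-- pv_equiv track=rewrite | github.com/hughsie/python-appstream | appstream/utils.py | import_description
-- ===== SOURCE A (Python) =====
-- def _import_description_to_list_element(text):
--     if len(text) < 5:
--         return None
--     if text.startswith('- '):
--         return text[2:]
--     if text[0].isdigit and text[1:3] == '. ':
--         return text[3:]
--     return None
--
-- def _import_description_sentence_case(text):
--     return text[0].upper() + text[1:]
--
-- def import_description(text):
--     """ Convert ASCII text to AppStream markup format """
--     xml = ''
--     is_in_ul = False
--     for line in text.split('\n'):
--
--         # don't include whitespace
--         line = line.strip()
--         if len(line) == 0:
--             continue
--
--         # detected as a list element?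
--         line_li = _import_description_to_list_element(line)
--         if line_li:
--             # first list element
--             if not is_in_ul:
--                 xml += '<ul>\n'
--                 is_in_ul = True
--             xml += '<li>' + _import_description_sentence_case(line_li) + '</li>\n'
--             continue
--
--         # done with the list
--         if is_in_ul:
--             xml += '</ul>\n'
--             is_in_ul = False
--
--         # regular paragraph
--         xml += '<p>' + _import_description_sentence_case(line) + '</p>\n'
--
--     # no trailing paragraph
--     if is_in_ul:
--         xml += '</ul>\n'
--
--     return xml
-- ===== SOURCE B (Python) =====
-- def _import_description_to_list_element(text):
--     if len(text) < 5:
--         return None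
--     if text.startswith('- '):
--         return text[2:]
--     if text[0].isdigit and text[1:3] == '. ':
--         return text[3:]
--     return None
--
-- def _import_description_sentence_case(text):
--     return text[0].upper() + text[1:]
--
-- def import_description(text):
--     """ Convert ASCII text to AppStream markup format """
--     # group the cleaned lines into runs of list items / single paragraphs, then emit blocks
--     cleaned = [s for s in (l.strip() for l in text.split('\n')) if s]
--     items = [(s, _import_description_to_list_element(s)) for s in cleaned]
--     out = []
--     i, n = 0, len(items)
--     while i < n:
--         s, li = items[i]
--         if li:
--             j = i + 1
--             while j < n and items[j][1]:
--                 j += 1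
--             out.append('<ul>\n')
--             out.extend('<li>' + _import_description_sentence_case(x) + '</li>\n'
--                        for _, x in items[i:j])
--             out.append('</ul>\n')
--             i = j
--         else:
--             out.append('<p>' + _import_description_sentence_case(s) + '</p>\n')
--             i += 1
--     return ''.join(out)
-- ===== Notes on version B (the rewrite author's own statement) =====
-- stated objective: alternative
-- what changed: Instead of one stateful pass carrying an is_in_ul flag that opens/closes <ul> tags on transitions, B first builds the list of cleaned classified lines and then groups consecutive list items with an index scan, emitting each <ul> block or paragraph as a whole.
import Mathlib
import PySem

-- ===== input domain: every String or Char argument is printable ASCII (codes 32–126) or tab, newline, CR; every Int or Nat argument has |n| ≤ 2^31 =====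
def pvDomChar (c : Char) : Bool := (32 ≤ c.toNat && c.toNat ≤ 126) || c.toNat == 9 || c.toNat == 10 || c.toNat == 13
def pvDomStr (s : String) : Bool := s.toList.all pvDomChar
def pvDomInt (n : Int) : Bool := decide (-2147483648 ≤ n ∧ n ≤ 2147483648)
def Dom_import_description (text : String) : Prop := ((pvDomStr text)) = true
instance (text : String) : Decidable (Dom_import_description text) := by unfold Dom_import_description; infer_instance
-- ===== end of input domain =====

-- B groups consecutive list-item lines with an index scan and emits whole blocks, instead of A's
-- stateful single pass with an is_in_ul flag; same output, same cost.

-- ===== PORT A =====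

-- _import_description_to_list_element; `text[0].isdigit` is an uncalled bound method (always truthy
-- since len(text) ≥ 5), so the Python condition reduces to the slice test alone.
def pvToListElement (t : List Char) : Option (List Char) :=
  if t.length < 5 then none
  else if PySem.Chars.startswith t ['-', ' '] then some (PySem.List.slice t (some 2) none)
  else if PySem.List.slice t (some 1) (some 3) = ['.', ' '] then some (PySem.List.slice t (some 3) none)
  else none

-- _import_description_sentence_case; text[0] raises IndexError on "" but every call site passes a
-- nonempty string, so the [] branch is unreachable.
def pvSentenceCase (t : List Char) : List Char :=
  match t with
  | [] => []
  | c :: rest => PySem.Chars.upperChar c :: rest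

-- Python truthiness of the Optional[str] `line_li`
def pvTruthy : Option (List Char) → Bool
  | none => false
  | some s => !s.isEmpty

def pvStepA (st : List Char × Bool) (line : List Char) : List Char × Bool :=
  let line := PySem.Chars.strip line
  if line.length = 0 then st
  else
    let li := pvToListElement line
    if pvTruthy li then
      let xml := if !st.2 then st.1 ++ "<ul>\n".toList else st.1
      (xml ++ "<li>".toList ++ pvSentenceCase (li.getD []) ++ "</li>\n".toList, true)
    else
      let xml := if st.2 then st.1 ++ "</ul>\n".toList else st.1
      (xml ++ "<p>".toList ++ pvSentenceCase line ++ "</p>\n".toList, false)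

def import_description (text : String) : String :=
  let st := (PySem.Chars.splitOn text.toList ['\n']).foldl pvStepA ([], false)
  String.ofList (if st.2 then st.1 ++ "</ul>\n".toList else st.1)

-- ===== PORT B =====

def pvLiLine (it : List Char × Option (List Char)) : List Char :=
  "<li>".toList ++ pvSentenceCase (it.2.getD []) ++ "</li>\n".toList

-- the outer while loop over items; the inner `while j < n and items[j][1]` scan is takeWhile/dropWhile
def pvRender : List (List Char × Option (List Char)) → List Char
  | [] => []
  | (l, li) :: rest =>
    if pvTruthy li then
      let grp := (l, li) :: rest.takeWhile (fun it => pvTruthy it.2)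
      "<ul>\n".toList ++ (grp.map pvLiLine).flatten ++ "</ul>\n".toList
        ++ pvRender (rest.dropWhile (fun it => pvTruthy it.2))
    else
      "<p>".toList ++ pvSentenceCase l ++ "</p>\n".toList ++ pvRender rest
  termination_by items => items.length
  decreasing_by
    · simpa using Nat.lt_succ_of_le (List.length_dropWhile_le _ _)
    · simp

def import_description_alt (text : String) : String :=
  let cleaned := ((PySem.Chars.splitOn text.toList ['\n']).map PySem.Chars.strip).filter
      (fun s => !s.isEmpty)
  let items := cleaned.map (fun s => (s, pvToListElement s))
  String.ofList (pvRender items)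

-- ===== PRECONDITION & SPEC =====
def Spec_import_description (text : String) (out : String) : Prop := out = import_description_alt text
instance (text : String) (out : String) : Decidable (Spec_import_description text out) := by unfold Spec_import_description; infer_instance

-- ===== CLAIM (what is proved, stated in full; the proofs are below) =====
def Claim_equal_import_description : Prop := ∀ (text : String), Dom_import_description text → Spec_import_description text (import_description text)

-- ===== LEMMAS AND PROOFS =====

-- A's step on an item pair (already stripped, nonempty)
def pvCoreP (st : List Char × Bool) (it : List Char × Option (List Char)) : List Char × Bool :=
  if pvTruthy it.2 then
    ((if !st.2 then st.1 ++ "<ul>\n".toList else st.1) ++ pvLiLine it, true)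
  else
    ((if st.2 then st.1 ++ "</ul>\n".toList else st.1)
      ++ "<p>".toList ++ pvSentenceCase it.1 ++ "</p>\n".toList, false)

def pvFinish (st : List Char × Bool) : List Char :=
  if st.2 then st.1 ++ "</ul>\n".toList else st.1

lemma pvStepA_eq (st : List Char × Bool) (line : List Char) :
    pvStepA st line =
      if (PySem.Chars.strip line).isEmpty then st
      else pvCoreP st (PySem.Chars.strip line, pvToListElement (PySem.Chars.strip line)) := by
  simp only [pvStepA, pvCoreP, pvLiLine, List.isEmpty_iff, List.length_eq_zero_iff]
  split_ifs <;> simp_all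

-- fold A over raw lines = fold pvCoreP over the cleaned items
lemma pvFoldA_eq (lines : List (List Char)) (st : List Char × Bool) :
    lines.foldl pvStepA st =
      (((lines.map PySem.Chars.strip).filter (fun s => !s.isEmpty)).map
        (fun s => (s, pvToListElement s))).foldl pvCoreP st := by
  induction lines generalizing st with
  | nil => rfl
  | cons l rest ih =>
    simp only [List.foldl_cons, List.map_cons, List.filter_cons, pvStepA_eq]
    by_cases h : (PySem.Chars.strip l).isEmpty
    · simp [h, ih]
    · simp [h, ih]

-- pvCoreP only appends to the accumulator
lemma pvCoreP_acc (acc : List Char) (b : Bool) (it : List Char × Option (List Char)) :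
    pvCoreP (acc, b) it =
      (acc ++ (pvCoreP ([], b) it).1, (pvCoreP ([], b) it).2) := by
  simp only [pvCoreP]
  by_cases h : pvTruthy it.2 <;> cases b <;> simp [h]

-- the tail of A's output from a given flag state, acc-free
lemma pvFoldCore_acc (items : List (List Char × Option (List Char)))
    (acc : List Char) (b : Bool) :
    items.foldl pvCoreP (acc, b) =
      (acc ++ (items.foldl pvCoreP ([], b)).1, (items.foldl pvCoreP ([], b)).2) := by
  induction items generalizing acc b with
  | nil => simp
  | cons it rest ih =>
    simp only [List.foldl_cons]
    cases hc : pvCoreP ([], b) it with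
    | mk s b' =>
      rw [pvCoreP_acc acc b it, hc, ih (acc ++ s) b', ih s b']
      simp

-- closing the flag distributes over an accumulated prefix
lemma pvFinish_append (acc : List Char) (st : List Char × Bool) :
    pvFinish (acc ++ st.1, st.2) = acc ++ pvFinish st := by
  simp only [pvFinish]
  split_ifs <;> simp

-- unfolding pvRender at a cons
lemma pvRender_cons_pos (l : List Char) (li : Option (List Char))
    (rest : List (List Char × Option (List Char))) (h : pvTruthy li = true) :
    pvRender ((l, li) :: rest) =
      "<ul>\n".toList
        ++ (((l, li) :: rest.takeWhile (fun it => pvTruthy it.2)).map pvLiLine).flatten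
        ++ "</ul>\n".toList ++ pvRender (rest.dropWhile (fun it => pvTruthy it.2)) := by
  rw [pvRender.eq_def]
  simp [h]

lemma pvRender_cons_neg (l : List Char) (li : Option (List Char))
    (rest : List (List Char × Option (List Char))) (h : pvTruthy li = false) :
    pvRender ((l, li) :: rest) =
      "<p>".toList ++ pvSentenceCase l ++ "</p>\n".toList ++ pvRender rest := by
  rw [pvRender.eq_def]
  simp [h]

-- main grouping lemma: A's remaining output equals B's block rendering
lemma pvMain (items : List (List Char × Option (List Char))) :
    pvFinish (items.foldl pvCoreP ([], false)) = pvRender items ∧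
    pvFinish (items.foldl pvCoreP ([], true)) =
      ((items.takeWhile (fun it => pvTruthy it.2)).map pvLiLine).flatten
        ++ "</ul>\n".toList ++ pvRender (items.dropWhile (fun it => pvTruthy it.2)) := by
  induction items with
  | nil => constructor <;> simp [pvFinish, pvRender]
  | cons it rest ih =>
    obtain ⟨l, li⟩ := it
    by_cases h : pvTruthy li
    · constructor
      · have hc : pvCoreP ([], false) (l, li) = ("<ul>\n".toList ++ pvLiLine (l, li), true) := by
          simp [pvCoreP, h]
        rw [List.foldl_cons, hc, pvFoldCore_acc, pvFinish_append, ih.2,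
          pvRender_cons_pos l li rest h]
        simp [List.append_assoc]
      · have hc : pvCoreP ([], true) (l, li) = (pvLiLine (l, li), true) := by
          simp [pvCoreP, h]
        rw [List.foldl_cons, hc, pvFoldCore_acc, pvFinish_append, ih.2]
        simp [h, List.append_assoc]
    · constructor
      · have hc : pvCoreP ([], false) (l, li) =
            ("<p>".toList ++ pvSentenceCase l ++ "</p>\n".toList, false) := by
          simp [pvCoreP, h]
        rw [List.foldl_cons, hc, pvFoldCore_acc, pvFinish_append, ih.1,
          pvRender_cons_neg l li rest (by simpa using h)]
      · have hc : pvCoreP ([], true) (l, li) =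
            ("</ul>\n".toList ++ "<p>".toList ++ pvSentenceCase l ++ "</p>\n".toList, false) := by
          simp [pvCoreP, h]
        rw [List.foldl_cons, hc, pvFoldCore_acc, pvFinish_append, ih.1]
        rw [show (((l, li) :: rest).dropWhile (fun it => pvTruthy it.2)) = (l, li) :: rest from by
          simp [h]]
        rw [pvRender_cons_neg l li rest (by simpa using h)]
        simp [h, List.append_assoc]

-- ===== VERDICT (by name: the statement is the Claim_ definition above) =====
theorem import_description_spec : Claim_equal_import_description := by
  intro text _
  unfold Spec_import_description import_description import_description_alt
  rw [pvFoldA_eq]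
  exact congrArg String.ofList (pvMain _).1
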